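-- pv_equiv track=rewrite | github.com/luhego/advent-of-code-2022 | day7/no-space-left-on-device.py | find_dirs
-- ===== SOURCE A (Python) =====
-- def find_dirs(tree, current_dir, dirs_size_map):
--     files = tree.get(current_dir) or {}
--
--     total_size = 0
--     for name, size in files.items():
--         if size is not None:
--             total_size += int(size)
--         else:
--             dirname = f"{current_dir}/{name}" if current_dir != "/" else f"/{name}"
--             total_size += find_dirs(tree, dirname, dirs_size_map)
--
--     dirs_size_map[current_dir] = total_size
--     return total_size
-- ===== SOURCE B (Python) =====
-- # Bottom-up DP over tree keys sorted by decreasing path length (children are always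
-- # strictly longer than their parent), replacing A's recursion; return value only:
-- # B does not write into dirs_size_map, while A fills it for every visited directory.
-- def find_dirs(tree, current_dir, dirs_size_map):
--     sizes = {}
--     for d in sorted(tree.keys(), key=len, reverse=True):
--         total = 0
--         for name, size in (tree.get(d) or {}).items():
--             if size is not None:
--                 total += int(size)
--             else:
--                 child = f"{d}/{name}" if d != "/" else f"/{name}"
--                 total += sizes.get(child, 0)
--         sizes[d] = total
--     return sizes.get(current_dir, 0)
-- ===== Notes on version B (the rewrite author's own statement) =====
-- stated objective: alternative
-- what changed: Replaces A's top-down recursion over the directory tree by a non-recursive bottom-up dynamic program: keys are sorted by decreasing path length (a subdirectory's path is always strictly longer than its parent's), each key's total is computed once from already-computed child totals in a sizes map, and the answer is looked up; each directory is computed once even when referenced from several parents, and B avoids A's recursion-depth limit; equivalence is about the return value only (A also writes visited directories into dirs_size_map, B does not).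
import Mathlib
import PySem

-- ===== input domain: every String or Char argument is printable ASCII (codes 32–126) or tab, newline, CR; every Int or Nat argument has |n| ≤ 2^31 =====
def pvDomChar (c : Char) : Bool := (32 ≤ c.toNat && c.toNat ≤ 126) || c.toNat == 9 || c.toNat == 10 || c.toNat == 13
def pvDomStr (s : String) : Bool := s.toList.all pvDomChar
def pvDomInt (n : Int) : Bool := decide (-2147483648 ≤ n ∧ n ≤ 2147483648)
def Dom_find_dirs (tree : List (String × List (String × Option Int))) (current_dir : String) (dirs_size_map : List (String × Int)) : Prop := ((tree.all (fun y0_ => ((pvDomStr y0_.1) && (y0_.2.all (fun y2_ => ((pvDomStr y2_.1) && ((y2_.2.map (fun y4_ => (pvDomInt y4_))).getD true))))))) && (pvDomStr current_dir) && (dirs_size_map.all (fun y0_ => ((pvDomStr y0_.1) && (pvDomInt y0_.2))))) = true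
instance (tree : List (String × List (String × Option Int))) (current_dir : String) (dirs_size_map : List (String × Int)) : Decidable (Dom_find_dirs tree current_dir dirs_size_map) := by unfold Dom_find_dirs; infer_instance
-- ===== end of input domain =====

-- B replaces A's top-down recursion by a bottom-up DP over the keys sorted by decreasing
-- path length (objective: alternative); equivalence is about the RETURN value only —
-- A also writes every visited directory's size into dirs_size_map, B does not mutate it.

-- ===== PORT A =====
-- files = tree.get(current_dir) or {}   (a missing key and an empty dict both give {})
def pvFiles (tree : List (String × List (String × Option Int))) (d : String) : List (String × Option Int) :=
  (List.lookup d tree).getD []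

-- dirname = f"{current_dir}/{name}" if current_dir != "/" else f"/{name}"
def pvChild (d n : String) : String := if d ≠ "/" then d ++ "/" ++ n else "/" ++ n

def pvMaxKeyLen (tree : List (String × List (String × Option Int))) : Nat :=
  tree.foldr (fun p m => max p.1.length m) 0

-- A's recursion, with fuel: every recursive step on a Pre_ input strictly lengthens the
-- path and recursion only continues on keys of the tree, so fuel maxKeyLen+2 is never
-- exhausted on Pre_ inputs (proved in the stability lemma below).
def pvFindA (tree : List (String × List (String × Option Int))) : Nat → String → Int
  | 0, _ => 0
  | f + 1, d =>
      (pvFiles tree d).foldl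
        (fun acc p =>
          match p.2 with
          | some k => acc + k
          | none => acc + pvFindA tree f (pvChild d p.1)) 0

def find_dirs (tree : List (String × List (String × Option Int))) (current_dir : String) (dirs_size_map : List (String × Int)) : Int :=
  pvFindA tree (pvMaxKeyLen tree + 2) current_dir

-- ===== PORT B =====
-- one iteration of B's loop body: sizes[d] = sum of file sizes + sizes.get(child, 0)
def pvStep (tree : List (String × List (String × Option Int))) (sz : PySem.Dict String Int) (d : String) : PySem.Dict String Int :=
  sz.insert d
    ((pvFiles tree d).foldl
      (fun acc p =>
        match p.2 with
        | some k => acc + k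
        | none => acc + sz.getD (pvChild d p.1) 0) 0)

def find_dirs_alt (tree : List (String × List (String × Option Int))) (current_dir : String) (dirs_size_map : List (String × Int)) : Int :=
  let sortedKeys := PySem.List.sorted (tree.map Prod.fst) (fun s => s.length) true
  (sortedKeys.foldl (pvStep tree) PySem.Dict.empty).getD current_dir 0

-- ===== PRECONDITION & SPEC =====
-- Pre_ excludes exactly the inputs on which A raises RecursionError: the self-loop
-- directory '/' containing a None entry named '', entered from '/' itself or from ''.
def Pre_find_dirs (tree : List (String × List (String × Option Int))) (current_dir : String) (dirs_size_map : List (String × Int)) : Prop :=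
  ("", (none : Option Int)) ∈ ((List.lookup "/" tree).getD []) →
    (current_dir ≠ "/" ∧ (current_dir = "" → ("", (none : Option Int)) ∉ ((List.lookup "" tree).getD [])))
instance (tree : List (String × List (String × Option Int))) (current_dir : String) (dirs_size_map : List (String × Int)) : Decidable (Pre_find_dirs tree current_dir dirs_size_map) := by unfold Pre_find_dirs; infer_instance

def pvWitness_find_dirs : (List (String × List (String × Option Int))) × String × (List (String × Int)) :=
  ([("/", [("a", some 3), ("b", none)]), ("/b", [("c", some 4)])], "/", [])

def Spec_find_dirs (tree : List (String × List (String × Option Int))) (current_dir : String) (dirs_size_map : List (String × Int)) (out : Int) : Prop := out = find_dirs_alt tree current_dir dirs_size_map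
instance (tree : List (String × List (String × Option Int))) (current_dir : String) (dirs_size_map : List (String × Int)) (out : Int) : Decidable (Spec_find_dirs tree current_dir dirs_size_map out) := by unfold Spec_find_dirs; infer_instance

-- ===== CLAIM (what is proved, stated in full; the proofs are below) =====
def Claim_equal_find_dirs : Prop := ∀ (tree : List (String × List (String × Option Int))) (current_dir : String) (dirs_size_map : List (String × Int)), Dom_find_dirs tree current_dir dirs_size_map → Pre_find_dirs tree current_dir dirs_size_map → Spec_find_dirs tree current_dir dirs_size_map (find_dirs tree current_dir dirs_size_map)


-- ===== LEMMAS AND PROOFS =====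

-- a directory is "good" when the traversal from it can never enter the '/'-self-loop
def pvGood (tree : List (String × List (String × Option Int))) (d : String) : Prop :=
  ("", (none : Option Int)) ∈ pvFiles tree "/" →
    (d ≠ "/" ∧ (d = "" → ("", (none : Option Int)) ∉ pvFiles tree ""))

-- the per-entry contribution inside A's loop, at fuel f
def pvGA (tree : List (String × List (String × Option Int))) (f : Nat) (d : String) (p : String × Option Int) : Int :=
  match p.2 with
  | some k => k
  | none => pvFindA tree f (pvChild d p.1)

-- the per-entry contribution inside B's loop body
def pvGB (tree : List (String × List (String × Option Int))) (sz : PySem.Dict String Int) (d : String) (p : String × Option Int) : Int :=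
  match p.2 with
  | some k => k
  | none => sz.getD (pvChild d p.1) 0

theorem pvLookup_none (d : String) (tree : List (String × List (String × Option Int)))
    (h : d ∉ tree.map Prod.fst) : List.lookup d tree = none := by
  rw [List.lookup_eq_none_iff]
  intro p hp
  simp only [bne_iff_ne, ne_eq]
  intro he; exact h (he ▸ List.mem_map_of_mem hp)

theorem pvFiles_nil_of_not_mem (tree : List (String × List (String × Option Int))) (d : String)
    (h : d ∉ tree.map Prod.fst) : pvFiles tree d = [] := by
  simp [pvFiles, pvLookup_none d tree h]

theorem pvLen_le_max (tree : List (String × List (String × Option Int))) (d : String)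
    (h : d ∈ tree.map Prod.fst) : d.length ≤ pvMaxKeyLen tree := by
  unfold pvMaxKeyLen
  induction tree with
  | nil => simp at h
  | cons p t ih =>
    rcases List.mem_cons.mp h with h | h
    · subst h; simp [List.foldr]
    · exact le_trans (ih h) (by simp [List.foldr])

theorem pvFindA_succ (tree : List (String × List (String × Option Int))) (f : Nat) (d : String) :
    pvFindA tree (f + 1) d = ((pvFiles tree d).map (pvGA tree f d)).sum := by
  have he : (fun (acc : Int) (p : String × Option Int) =>
      match p.2 with
      | some k => acc + k
      | none => acc + pvFindA tree f (pvChild d p.1)) =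
      fun acc p => acc + pvGA tree f d p := by
    funext acc p
    cases hp : p.2 <;> simp [pvGA, hp]
  rw [pvFindA, he, PySem.List.foldl_add]
  simp

theorem pvFindA_of_not_mem (tree : List (String × List (String × Option Int))) (f : Nat) (d : String)
    (h : d ∉ tree.map Prod.fst) : pvFindA tree f d = 0 := by
  cases f with
  | zero => rfl
  | succ f => rw [pvFindA_succ, pvFiles_nil_of_not_mem tree d h]; rfl

theorem pvChild_length_pos (d n : String) : 0 < (pvChild d n).length := by
  have h1 : ("/" : String).length = 1 := rfl
  unfold pvChild
  split <;> simp [String.length_append, h1]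

theorem pvChild_ne_empty (d n : String) : pvChild d n ≠ "" := by
  intro h
  have := pvChild_length_pos d n
  rw [h] at this
  simp at this

theorem pvChild_good_and_long (t : List (String × List (String × Option Int))) (d n : String)
    (hg : pvGood t d) (hm : (n, (none : Option Int)) ∈ pvFiles t d) :
    d.length + 1 ≤ (pvChild d n).length ∧ pvGood t (pvChild d n) := by
  by_cases hd : d = "/"
  · subst hd
    have hn : n ≠ "" := by
      intro h; subst h
      exact absurd rfl (hg hm).1
    have hnl : 0 < n.length := by
      rcases Nat.eq_zero_or_pos n.length with h | h
      · exact absurd (String.length_eq_zero_iff.mp h) hn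
      · exact h
    constructor
    · show ("/" : String).length + 1 ≤ (pvChild "/" n).length
      have h1 : ("/" : String).length = 1 := rfl
      simp only [pvChild, ne_eq, not_true_eq_false, if_false, String.length_append, h1]
      omega
    · intro hbad
      exact absurd rfl (hg hbad).1
  · constructor
    · have h1 : ("/" : String).length = 1 := rfl
      simp only [pvChild, ne_eq, hd, not_false_eq_true, if_true, String.length_append, h1]
      omega
    · intro hbad
      refine ⟨?_, fun he => absurd he (pvChild_ne_empty d n)⟩
      intro he
      have hlen := congrArg String.length he
      simp only [pvChild, ne_eq, hd, not_false_eq_true, if_true, String.length_append] at hlen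
      have hroot : ("/" : String).length = 1 := rfl
      rw [hroot] at hlen
      have hd0 : d = "" := String.length_eq_zero_iff.mp (by omega)
      have hn0 : n = "" := String.length_eq_zero_iff.mp (by omega)
      subst hd0; subst hn0
      exact absurd hm ((hg hbad).2 rfl)

theorem pvFindA_stable (t : List (String × List (String × Option Int))) :
    ∀ (f₁ f₂ : Nat) (d : String), pvGood t d →
      pvMaxKeyLen t + 2 ≤ f₁ + d.length → pvMaxKeyLen t + 2 ≤ f₂ + d.length →
      pvFindA t f₁ d = pvFindA t f₂ d := by
  intro f₁
  induction f₁ with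
  | zero =>
    intro f₂ d _ h1 _
    have hm : d ∉ t.map Prod.fst := by
      intro hmem
      have := pvLen_le_max t d hmem
      omega
    rw [pvFindA_of_not_mem t 0 d hm, pvFindA_of_not_mem t f₂ d hm]
  | succ f ih =>
    intro f₂ d hg h1 h2
    by_cases hm : d ∈ t.map Prod.fst
    · have hdl : d.length ≤ pvMaxKeyLen t := pvLen_le_max t d hm
      cases f₂ with
      | zero => omega
      | succ f₂' =>
        rw [pvFindA_succ, pvFindA_succ]
        congr 1
        apply List.map_congr_left
        intro p hp
        cases hp2 : p.2 with
        | some k => simp [pvGA, hp2]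
        | none =>
          have hmm : (p.1, (none : Option Int)) ∈ pvFiles t d := by
            have : p = (p.1, (none : Option Int)) := by
              cases p; simp at hp2 ⊢; exact hp2
            rw [← this]; exact hp
          obtain ⟨hlen, hgood⟩ := pvChild_good_and_long t d p.1 hg hmm
          simp only [pvGA, hp2]
          exact ih f₂' (pvChild d p.1) hgood (by omega) (by omega)
    · rw [pvFindA_of_not_mem t _ d hm, pvFindA_of_not_mem t _ d hm]

theorem pvStep_eq (t : List (String × List (String × Option Int))) (sz : PySem.Dict String Int) (d : String) :
    pvStep t sz d = sz.insert d (((pvFiles t d).map (pvGB t sz d)).sum) := by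
  have he : (fun (acc : Int) (p : String × Option Int) =>
      match p.2 with
      | some k => acc + k
      | none => acc + sz.getD (pvChild d p.1) 0) =
      fun acc p => acc + pvGB t sz d p := by
    funext acc p
    cases hp : p.2 <;> simp [pvGB, hp]
  rw [pvStep, he, PySem.List.foldl_add]
  simp

theorem pvDP_main (t : List (String × List (String × Option Int))) :
    ∀ (ks : List String) (sz : PySem.Dict String Int),
      ks.Pairwise (fun a b => b.length ≤ a.length) →
      (∀ k ∈ ks, k ∈ t.map Prod.fst) →
      (∀ c, pvGood t c → c ∈ t.map Prod.fst → c ∉ ks →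
        sz.getD c 0 = pvFindA t (pvMaxKeyLen t + 2) c) →
      (∀ c, c ∉ t.map Prod.fst → sz.getD c 0 = 0) →
      ∀ c, pvGood t c → (ks.foldl (pvStep t) sz).getD c 0 = pvFindA t (pvMaxKeyLen t + 2) c := by
  intro ks
  induction ks with
  | nil =>
    intro sz _ _ h3 h4 c hc
    simp only [List.foldl_nil]
    by_cases hm : c ∈ t.map Prod.fst
    · exact h3 c hc hm (by simp)
    · rw [h4 c hm, pvFindA_of_not_mem t _ c hm]
  | cons d ks' ih =>
    intro sz hp h2 h3 h4 c hc
    simp only [List.foldl_cons]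
    have hdk : d ∈ t.map Prod.fst := h2 d (by simp)
    have hdlen : ∀ k ∈ d :: ks', k.length ≤ d.length := by
      intro k hk
      rcases List.mem_cons.mp hk with h | h
      · subst h; exact le_refl _
      · exact (List.pairwise_cons.mp hp).1 k h
    -- when d is good, B's total for d equals A's value for d
    have htot : pvGood t d →
        ((pvFiles t d).map (pvGB t sz d)).sum = pvFindA t (pvMaxKeyLen t + 2) d := by
      intro hgd
      rw [show pvMaxKeyLen t + 2 = (pvMaxKeyLen t + 1) + 1 from rfl, pvFindA_succ]
      congr 1
      apply List.map_congr_left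
      intro p hp'
      cases hp2 : p.2 with
      | some k => simp [pvGB, pvGA, hp2]
      | none =>
        have hmm : (p.1, (none : Option Int)) ∈ pvFiles t d := by
          have : p = (p.1, (none : Option Int)) := by
            cases p; simp at hp2 ⊢; exact hp2
          rw [← this]; exact hp'
        obtain ⟨hlen, hgood⟩ := pvChild_good_and_long t d p.1 hgd hmm
        simp only [pvGB, pvGA, hp2]
        by_cases hck : pvChild d p.1 ∈ t.map Prod.fst
        · have hnin : pvChild d p.1 ∉ d :: ks' := by
            intro hin
            have := hdlen _ hin
            omega
          rw [h3 _ hgood hck hnin]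
          have hcl : 0 < (pvChild d p.1).length := pvChild_length_pos d p.1
          exact pvFindA_stable t (pvMaxKeyLen t + 2) (pvMaxKeyLen t + 1) _ hgood (by omega) (by omega)
        · rw [h4 _ hck, pvFindA_of_not_mem t _ _ hck]
    apply ih (pvStep t sz d) hp.of_cons (fun k hk => h2 k (List.mem_cons_of_mem d hk)) ?_ ?_ c hc
    · intro c' hg' hm' hnin'
      by_cases he : c' = d
      · subst he
        rw [pvStep_eq, PySem.Dict.getD_insert_self]
        exact htot hg'
      · rw [pvStep_eq, PySem.Dict.getD_insert_of_ne _ _ _ he]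
        exact h3 c' hg' hm' (by
          intro hin
          rcases List.mem_cons.mp hin with h | h
          · exact he h
          · exact hnin' h)
    · intro c' hm'
      have he : c' ≠ d := by intro h; subst h; exact hm' hdk
      rw [pvStep_eq, PySem.Dict.getD_insert_of_ne _ _ _ he]
      exact h4 c' hm'

-- ===== VERDICT (by name: the statement is the Claim_ definition above) =====
theorem find_dirs_spec : Claim_equal_find_dirs := by
  intro tree current_dir dirs_size_map _ hpre
  show find_dirs tree current_dir dirs_size_map = find_dirs_alt tree current_dir dirs_size_map
  have hg : pvGood tree current_dir := hpre
  have hmain := pvDP_main tree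
    (PySem.List.sorted (tree.map Prod.fst) (fun s => s.length) true) PySem.Dict.empty
    (PySem.List.sorted_pairwise_rev (tree.map Prod.fst) (fun s => s.length))
    (fun k hk => (PySem.List.mem_sorted _ _ _ _).mp hk)
    (fun c _ hmem hnin => absurd ((PySem.List.mem_sorted _ _ _ _).mpr hmem) hnin)
    (fun c _ => PySem.Dict.getD_empty c 0)
    current_dir hg
  exact hmain.symm
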